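-- pv_equiv track=rewrite | github.com/gualee/Generate-Gaussian-distribution-dataset | Gaussian dataset.py | cal_cov
-- ===== SOURCE A (Python) =====
-- def cal_cov(dimension,p,c):
--     for j in range(dimension):
--         c[0][j] = pow(p, j)
--
--     for i in range(dimension - 1):
--         for j in range(dimension - 1):
--             if i == j:
--                 c[i][j] = 1
--             c[i+1][j+1] = c[i][j]
--
--     for i in range(dimension):
--         for j in range(dimension):
--             if i < j:
--                 c[j][i] = c[i][j]
--     return c
-- ===== SOURCE B (Python) =====
-- def cal_cov(dimension, p, c):
--     for i in range(dimension):
--         row = c[i]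
--         for j in range(dimension):
--             row[j] = 1 if i == j else pow(p, abs(i - j))
--     return c
-- ===== Notes on version B (the rewrite author's own statement) =====
-- stated objective: simpler
-- what changed: Replaces A's three passes (power-fill of row 0, diagonal propagation recurrence c[i+1][j+1]=c[i][j], and mirror of the upper triangle) by one closed-form double loop writing c[i][j] = 1 on the diagonal and p**|i-j| elsewhere.
import Mathlib
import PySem

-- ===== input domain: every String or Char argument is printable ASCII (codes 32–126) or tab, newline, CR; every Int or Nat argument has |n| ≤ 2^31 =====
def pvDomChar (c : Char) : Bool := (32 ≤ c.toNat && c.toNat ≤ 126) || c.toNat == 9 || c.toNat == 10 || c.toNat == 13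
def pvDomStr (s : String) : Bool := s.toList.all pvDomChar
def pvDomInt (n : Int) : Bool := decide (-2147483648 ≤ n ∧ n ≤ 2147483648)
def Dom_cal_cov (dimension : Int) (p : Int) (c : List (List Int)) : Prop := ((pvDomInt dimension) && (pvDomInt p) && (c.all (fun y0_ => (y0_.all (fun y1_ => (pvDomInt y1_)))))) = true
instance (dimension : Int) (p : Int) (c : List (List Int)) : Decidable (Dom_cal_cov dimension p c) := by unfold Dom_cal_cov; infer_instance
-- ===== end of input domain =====

-- B replaces A's three-pass diagonal-propagation-and-mirror scheme with one closed-form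
-- double loop (simpler, same O(n^2) cost); the equivalence proved is about the RETURN value
-- only (both Pythons also mutate the rows of c in place, in the same square region).

-- ===== PORT A =====
-- matrix write c[i][j] = v (indices here are always ≥ 0; in-range inside Pre_)
def pvMset (c : List (List Int)) (i j : Nat) (v : Int) : List (List Int) :=
  c.set i ((c.getD i []).set j v)
-- matrix read c[i][j] (in-range inside Pre_, where it equals Python's c[i][j])
def pvMget (c : List (List Int)) (i j : Nat) : Int :=
  (c.getD i []).getD j 0

-- literal transliteration of A: pass 1 fills row 0 with powers, pass 2 propagates
-- diagonally (writing 1 on the diagonal), pass 3 mirrors the upper triangle.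
-- range indices are nonnegative, so .toNat is exact; pow(p, j) with j ≥ 0 is p ^ j.toNat.
def cal_cov (dimension : Int) (p : Int) (c : List (List Int)) : List (List Int) :=
  let c1 := (PySem.List.pyRange 0 dimension 1).foldl
    (fun acc j => pvMset acc 0 j.toNat (p ^ j.toNat)) c
  let c2 := (PySem.List.pyRange 0 (dimension - 1) 1).foldl
    (fun acc i =>
      (PySem.List.pyRange 0 (dimension - 1) 1).foldl
        (fun acc j =>
          let acc := if i = j then pvMset acc i.toNat j.toNat 1 else acc
          pvMset acc (i + 1).toNat (j + 1).toNat (pvMget acc i.toNat j.toNat)) acc) c1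
  (PySem.List.pyRange 0 dimension 1).foldl
    (fun acc i =>
      (PySem.List.pyRange 0 dimension 1).foldl
        (fun acc j =>
          if i < j then pvMset acc j.toNat i.toNat (pvMget acc i.toNat j.toNat) else acc) acc) c2

-- ===== PORT B =====
-- literal transliteration of B: for each i, rewrite row i entrywise with the closed form
-- (1 on the diagonal, p**abs(i-j) off it); abs(i-j) is (i-j).natAbs.
def cal_cov_alt (dimension : Int) (p : Int) (c : List (List Int)) : List (List Int) :=
  (PySem.List.pyRange 0 dimension 1).foldl
    (fun acc i =>
      let row := (PySem.List.pyRange 0 dimension 1).foldl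
        (fun row j => row.set j.toNat (if i = j then 1 else p ^ (i - j).natAbs))
        (acc.getD i.toNat [])
      acc.set i.toNat row) c

-- ===== PRECONDITION & SPEC =====
-- Pre_ excludes exactly the inputs on which A raises IndexError: a positive dimension with
-- fewer than `dimension` rows, or one of the first `dimension` rows shorter than `dimension`.
def Pre_cal_cov (dimension : Int) (p : Int) (c : List (List Int)) : Prop :=
  dimension ≤ 0 ∨ (dimension ≤ c.length ∧ ∀ r ∈ c.take dimension.toNat, dimension ≤ r.length)
instance (dimension : Int) (p : Int) (c : List (List Int)) : Decidable (Pre_cal_cov dimension p c) := by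
  unfold Pre_cal_cov; infer_instance

def pvWitness_cal_cov : Int × Int × List (List Int) := (2, 3, [[0, 0], [0, 0]])

def Spec_cal_cov (dimension : Int) (p : Int) (c : List (List Int)) (out : List (List Int)) : Prop := out = cal_cov_alt dimension p c
instance (dimension : Int) (p : Int) (c : List (List Int)) (out : List (List Int)) : Decidable (Spec_cal_cov dimension p c out) := by unfold Spec_cal_cov; infer_instance

-- ===== CLAIM (what is proved, stated in full; the proofs are below) =====
def Claim_equal_cal_cov : Prop := ∀ (dimension : Int) (p : Int) (c : List (List Int)), Dom_cal_cov dimension p c → Pre_cal_cov dimension p c → Spec_cal_cov dimension p c (cal_cov dimension p c)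

-- ===== LEMMAS AND PROOFS =====

-- row length of row i (0 if the row does not exist)
def pvRlen (c : List (List Int)) (i : Nat) : Nat := (c.getD i []).length

-- shape: at least n rows, the first n of length at least n
def pvShape (n : Nat) (c : List (List Int)) : Prop :=
  n ≤ c.length ∧ ∀ r < n, n ≤ pvRlen c r

-- Nat-indexed versions of the three passes of A and of B's loop (named step functions)
def pvA1in (p : Int) (acc : List (List Int)) (j : Nat) : List (List Int) :=
  pvMset acc 0 j (p ^ j)

def pvA1 (p : Int) (n : Nat) (c : List (List Int)) : List (List Int) :=
  (List.range n).foldl (pvA1in p) c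

def pvA2in (i : Nat) (acc : List (List Int)) (j : Nat) : List (List Int) :=
  let acc := if i = j then pvMset acc i j 1 else acc
  pvMset acc (i + 1) (j + 1) (pvMget acc i j)

def pvA2out (m : Nat) (acc : List (List Int)) (i : Nat) : List (List Int) :=
  (List.range m).foldl (pvA2in i) acc

def pvA2 (p : Int) (m : Nat) (c : List (List Int)) : List (List Int) :=
  (List.range m).foldl (pvA2out m) c

def pvA3in (i : Nat) (acc : List (List Int)) (j : Nat) : List (List Int) :=
  if i < j then pvMset acc j i (pvMget acc i j) else acc

def pvA3out (n : Nat) (acc : List (List Int)) (i : Nat) : List (List Int) :=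
  (List.range n).foldl (pvA3in i) acc

def pvA3 (n : Nat) (c : List (List Int)) : List (List Int) :=
  (List.range n).foldl (pvA3out n) c

def pvBrow (p : Int) (i : Nat) (row : List Int) (j : Nat) : List Int :=
  row.set j (if (i : Int) = (j : Int) then 1 else p ^ ((i : Int) - (j : Int)).natAbs)

def pvBout (p : Int) (n : Nat) (acc : List (List Int)) (i : Nat) : List (List Int) :=
  acc.set i ((List.range n).foldl (pvBrow p i) (acc.getD i []))

def pvB (p : Int) (n : Nat) (c : List (List Int)) : List (List Int) :=
  (List.range n).foldl (pvBout p n) c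

-- the value of entry (r,s) after A's pass 2, in terms of the pass-2 input o
def pvF (p : Int) (o : List (List Int)) (r s : Nat) : Int :=
  if r = 0 then p ^ s
  else if s = 0 then pvMget o r 0
  else if r ≤ s then p ^ (s - r)
  else pvMget o (r - s) 0

lemma foldl_pyRange_zero_range {α : Type} (d : Int) (f : α → Int → α) (init : α) :
    (PySem.List.pyRange 0 d 1).foldl f init
      = (List.range d.toNat).foldl (fun a (k : Nat) => f a (k : Int)) init := by
  simp only [PySem.List.pyRange_one, sub_zero, List.foldl_map, zero_add]

lemma pv_toNat_add_one (k : Nat) : ((k : Int) + 1).toNat = k + 1 := by omega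

lemma cal_cov_eq_nat (d p : Int) (c : List (List Int)) :
    cal_cov d p c = pvA3 d.toNat (pvA2 p (d - 1).toNat (pvA1 p d.toNat c)) := by
  unfold cal_cov pvA1 pvA2 pvA3 pvA1in pvA2out pvA2in pvA3out pvA3in
  simp only [foldl_pyRange_zero_range, Int.toNat_natCast, pv_toNat_add_one,
    Nat.cast_inj, Nat.cast_lt]

lemma cal_cov_alt_eq_nat (d p : Int) (c : List (List Int)) :
    cal_cov_alt d p c = pvB p d.toNat c := by
  unfold cal_cov_alt pvB pvBout pvBrow
  simp only [foldl_pyRange_zero_range, Int.toNat_natCast]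

-- basic pvMset / pvMget lemmas
lemma length_pvMset (c : List (List Int)) (i j : Nat) (v : Int) :
    (pvMset c i j v).length = c.length := by
  simp [pvMset]

lemma getD_set_self {α : Type} (c : List α) (i : Nat) (x d : α) (h : i < c.length) :
    (c.set i x).getD i d = x := by
  rw [List.getD_eq_getElem?_getD, List.getElem?_set_self (by simpa using h)]
  rfl

lemma getD_set_ne {α : Type} (c : List α) (i r : Nat) (x d : α) (h : r ≠ i) :
    (c.set i x).getD r d = c.getD r d := by
  rw [List.getD_eq_getElem?_getD, List.getD_eq_getElem?_getD,
    List.getElem?_set_ne (fun hh => h hh.symm)]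

lemma pvRlen_pvMset (c : List (List Int)) (i j : Nat) (v : Int) (r : Nat) :
    pvRlen (pvMset c i j v) r = pvRlen c r := by
  unfold pvRlen pvMset
  by_cases hic : i < c.length
  · by_cases hri : r = i
    · subst hri
      rw [getD_set_self _ _ _ _ hic, List.length_set]
    · rw [getD_set_ne _ _ _ _ _ hri]
  · rw [List.set_eq_of_length_le (by omega)]

lemma pvMget_pvMset_self (c : List (List Int)) (i j : Nat) (v : Int)
    (h1 : i < c.length) (h2 : j < pvRlen c i) :
    pvMget (pvMset c i j v) i j = v := by
  unfold pvMget pvMset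
  rw [getD_set_self _ _ _ _ h1]
  exact getD_set_self _ _ _ _ (by simpa [pvRlen] using h2)

lemma pvMget_pvMset_ne (c : List (List Int)) (i j r s : Nat) (v : Int)
    (h : i ≠ r ∨ j ≠ s) :
    pvMget (pvMset c i j v) r s = pvMget c r s := by
  by_cases hri : r = i
  · rcases h with h | h
    · exact absurd hri.symm h
    · subst hri
      unfold pvMget pvMset
      by_cases hic : r < c.length
      · rw [getD_set_self _ _ _ _ hic, getD_set_ne _ _ _ _ _ (fun hh => h hh.symm)]
      · rw [List.set_eq_of_length_le (by omega)]
  · unfold pvMget pvMset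
    rw [getD_set_ne _ _ _ _ _ hri]

-- generic fold-preservation lemmas
lemma foldl_len_pres {α β : Type} (g : List α → β → List α)
    (h : ∀ acc b, (g acc b).length = acc.length) :
    ∀ (l : List β) (c : List α), (l.foldl g c).length = c.length := by
  intro l
  induction l with
  | nil => intro c; rfl
  | cons x xs ih => intro c; rw [List.foldl_cons, ih, h]

lemma foldl_rlen_pres {β : Type} (g : List (List Int) → β → List (List Int))
    (h : ∀ acc b r, pvRlen (g acc b) r = pvRlen acc r) :
    ∀ (l : List β) (c : List (List Int)) (r : Nat), pvRlen (l.foldl g c) r = pvRlen c r := by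
  intro l
  induction l with
  | nil => intro c r; rfl
  | cons x xs ih => intro c r; rw [List.foldl_cons, ih, h]

lemma pvShape_of_pres (n : Nat) (c c' : List (List Int))
    (hl : c'.length = c.length) (hr : ∀ r, pvRlen c' r = pvRlen c r)
    (h : pvShape n c) : pvShape n c' := by
  exact ⟨by rw [hl]; exact h.1, fun r hrn => by rw [hr]; exact h.2 r hrn⟩

lemma pvRlen_set_row (c : List (List Int)) (i : Nat) (row' : List Int)
    (h : row'.length = pvRlen c i) (r : Nat) :
    pvRlen (c.set i row') r = pvRlen c r := by
  unfold pvRlen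
  by_cases hic : i < c.length
  · by_cases hri : r = i
    · subst hri
      rw [getD_set_self _ _ _ _ hic]; exact h
    · rw [getD_set_ne _ _ _ _ _ hri]
  · rw [List.set_eq_of_length_le (by omega)]

-- step-wise length / row-length preservation for each loop
lemma len_pvA1in (p : Int) (acc : List (List Int)) (j : Nat) :
    (pvA1in p acc j).length = acc.length := length_pvMset _ _ _ _

lemma rlen_pvA1in (p : Int) (acc : List (List Int)) (j r : Nat) :
    pvRlen (pvA1in p acc j) r = pvRlen acc r := pvRlen_pvMset _ _ _ _ _

lemma len_pvA2in (i : Nat) (acc : List (List Int)) (j : Nat) :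
    (pvA2in i acc j).length = acc.length := by
  unfold pvA2in
  by_cases h : i = j <;> simp [h, length_pvMset]

lemma rlen_pvA2in (i : Nat) (acc : List (List Int)) (j r : Nat) :
    pvRlen (pvA2in i acc j) r = pvRlen acc r := by
  unfold pvA2in
  by_cases h : i = j <;> simp [h, pvRlen_pvMset]

lemma len_pvA2out (m : Nat) (acc : List (List Int)) (i : Nat) :
    (pvA2out m acc i).length = acc.length :=
  foldl_len_pres _ (len_pvA2in i) _ _

lemma rlen_pvA2out (m : Nat) (acc : List (List Int)) (i r : Nat) :
    pvRlen (pvA2out m acc i) r = pvRlen acc r :=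
  foldl_rlen_pres _ (rlen_pvA2in i) _ _ _

lemma len_pvA3in (i : Nat) (acc : List (List Int)) (j : Nat) :
    (pvA3in i acc j).length = acc.length := by
  unfold pvA3in
  by_cases h : i < j <;> simp [h, length_pvMset]

lemma rlen_pvA3in (i : Nat) (acc : List (List Int)) (j r : Nat) :
    pvRlen (pvA3in i acc j) r = pvRlen acc r := by
  unfold pvA3in
  by_cases h : i < j <;> simp [h, pvRlen_pvMset]

lemma len_pvA3out (n : Nat) (acc : List (List Int)) (i : Nat) :
    (pvA3out n acc i).length = acc.length :=
  foldl_len_pres _ (len_pvA3in i) _ _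

lemma rlen_pvA3out (n : Nat) (acc : List (List Int)) (i r : Nat) :
    pvRlen (pvA3out n acc i) r = pvRlen acc r :=
  foldl_rlen_pres _ (rlen_pvA3in i) _ _ _

lemma len_pvBrow (p : Int) (i : Nat) (row : List Int) (j : Nat) :
    (pvBrow p i row j).length = row.length := List.length_set ..

lemma len_rowfold (p : Int) (i n : Nat) (row : List Int) :
    ((List.range n).foldl (pvBrow p i) row).length = row.length :=
  foldl_len_pres _ (len_pvBrow p i) _ _

lemma len_pvBout (p : Int) (n : Nat) (acc : List (List Int)) (i : Nat) :
    (pvBout p n acc i).length = acc.length := by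
  unfold pvBout; exact List.length_set ..

lemma rlen_pvBout (p : Int) (n : Nat) (acc : List (List Int)) (i r : Nat) :
    pvRlen (pvBout p n acc i) r = pvRlen acc r := by
  unfold pvBout
  exact pvRlen_set_row _ _ _ (len_rowfold p i n _) r

-- entry value after pass 2 in terms of the pass-2 input behaves well
lemma pvF_diag (p : Int) (o : List (List Int)) (k : Nat) : pvF p o k k = 1 := by
  unfold pvF
  rcases Nat.eq_zero_or_pos k with h | h
  · simp [h]
  · simp [Nat.pos_iff_ne_zero.mp h]

lemma pvF_shift (p : Int) (o : List (List Int)) (k t : Nat) :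
    pvF p o (k + 1) (t + 1) = pvF p o k t := by
  unfold pvF
  by_cases hk : k = 0
  · subst hk
    by_cases ht0 : t = 0 <;> simp [ht0] <;> omega
  · by_cases hkt : k ≤ t
    · simp [hk, hkt, Nat.succ_le_succ hkt]
      omega
    · have h1 : ¬ k + 1 ≤ t + 1 := by omega
      by_cases ht0 : t = 0 <;> simp [hk, hkt, h1, ht0]

lemma pvF_upper (p : Int) (o : List (List Int)) (r s : Nat) (h : r < s) :
    pvF p o r s = p ^ (s - r) := by
  unfold pvF
  have hs : s ≠ 0 := by omega
  by_cases hr : r = 0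
  · simp [hr]
  · simp [hr, hs, Nat.le_of_lt h]

-- pass 1: row 0 becomes the powers of p, everything else untouched
lemma pvA1_get (p : Int) (n : Nat) (c : List (List Int))
    (hc : 0 < c.length) (hr : n ≤ pvRlen c 0) (r s : Nat) :
    pvMget (pvA1 p n c) r s = if r = 0 ∧ s < n then p ^ s else pvMget c r s := by
  induction n with
  | zero => simp [pvA1]
  | succ n ih =>
    have hr' : n ≤ pvRlen c 0 := by omega
    rw [pvA1, List.range_succ, List.foldl_append, List.foldl_cons, List.foldl_nil]
    have hlen : (pvA1 p n c).length = c.length :=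
      foldl_len_pres _ (len_pvA1in p) _ _
    have hrlen : pvRlen (pvA1 p n c) 0 = pvRlen c 0 :=
      foldl_rlen_pres _ (rlen_pvA1in p) _ _ _
    show pvMget (pvA1in p (pvA1 p n c) n) r s = _
    unfold pvA1in
    by_cases h0 : r = 0 ∧ s = n
    · obtain ⟨h0r, h0s⟩ := h0
      subst h0r; subst h0s
      rw [pvMget_pvMset_self _ _ _ _ (by omega) (by omega)]
      simp
    · rw [pvMget_pvMset_ne _ _ _ _ _ _ (by omega), ih hr']
      by_cases hrz : r = 0
      · subst hrz
        have hne : s ≠ n := fun he => h0 ⟨rfl, he⟩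
        have hiff : (s < n + 1) ↔ (s < n) := by omega
        simp only [hiff]
      · simp [hrz]

-- entry function during A's pass 2, after the first k outer iterations
def pvE (p : Int) (o : List (List Int)) (m k r s : Nat) : Int :=
  if r ≤ k ∧ r < m + 1 ∧ s < m + 1 then pvF p o r s else pvMget o r s

lemma pvA2_inner (p : Int) (o : List (List Int)) (m k : Nat) (hk : k < m)
    (hS : pvShape (m + 1) o) (cst : List (List Int))
    (hlen : cst.length = o.length) (hrlen : ∀ r, pvRlen cst r = pvRlen o r)
    (hc : ∀ r s, pvMget cst r s = pvE p o m k r s) :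
    ∀ t, t ≤ m → ∀ r s,
      pvMget ((List.range t).foldl (pvA2in k) cst) r s
        = if r = k + 1 ∧ 1 ≤ s ∧ s ≤ t then pvF p o r s else pvE p o m k r s := by
  intro t
  induction t with
  | zero =>
    intro _ r s
    rw [List.range_zero, List.foldl_nil, hc r s, if_neg (by omega)]
  | succ t ih =>
    intro ht r s
    have ht' : t ≤ m := by omega
    rw [List.range_succ, List.foldl_append, List.foldl_cons, List.foldl_nil]
    set st := (List.range t).foldl (pvA2in k) cst with hst
    have hstlen : st.length = o.length := by
      rw [hst, foldl_len_pres _ (len_pvA2in k), hlen]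
    have hstrlen : ∀ r, pvRlen st r = pvRlen o r := fun r => by
      rw [hst, foldl_rlen_pres _ (rlen_pvA2in k), hrlen]
    have hget := ih ht'
    have hdiag : pvMget st k k = 1 := by
      rw [hget, if_neg (by omega)]
      unfold pvE
      rw [if_pos ⟨le_refl k, by omega, by omega⟩]
      exact pvF_diag p o k
    set C := if k = t then pvMset st k t 1 else st with hCdef
    have hClen : C.length = o.length := by
      by_cases hkt : k = t
      · rw [hCdef, if_pos hkt, length_pvMset, hstlen]
      · rw [hCdef, if_neg hkt, hstlen]
    have hCrlen : ∀ r, pvRlen C r = pvRlen o r := by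
      intro r
      by_cases hkt : k = t
      · rw [hCdef, if_pos hkt, pvRlen_pvMset, hstrlen]
      · rw [hCdef, if_neg hkt, hstrlen]
    have hc' : ∀ r s, pvMget C r s = pvMget st r s := by
      intro r s
      by_cases hkt : k = t
      · rw [hCdef, if_pos hkt, ← hkt]
        by_cases hrs : r = k ∧ s = k
        · obtain ⟨h1, h2⟩ := hrs
          rw [h1, h2, pvMget_pvMset_self _ _ _ _ (by rw [hstlen]; have := hS.1; omega)
            (by rw [hstrlen]; have := hS.2 k (by omega); omega)]
          exact hdiag.symm
        · rw [pvMget_pvMset_ne _ _ _ _ _ _ (by omega)]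
      · rw [hCdef, if_neg hkt]
    have hval : pvMget C k t = pvF p o k t := by
      rw [hc', hget, if_neg (by omega)]
      unfold pvE
      rw [if_pos ⟨le_refl k, by omega, by omega⟩]
    have hstep : pvA2in k st t = pvMset C (k + 1) (t + 1) (pvMget C k t) := by
      simp only [pvA2in, hCdef]
    rw [hstep, hval]
    by_cases hrs : r = k + 1 ∧ s = t + 1
    · obtain ⟨h1, h2⟩ := hrs
      rw [h1, h2, pvMget_pvMset_self _ _ _ _ (by rw [hClen]; have := hS.1; omega)
        (by rw [hCrlen]; have := hS.2 (k + 1) (by omega); omega)]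
      rw [if_pos ⟨rfl, by omega, le_refl _⟩, pvF_shift]
    · rw [pvMget_pvMset_ne _ _ _ _ _ _ (by omega), hc', hget]
      by_cases h2 : r = k + 1 ∧ 1 ≤ s ∧ s ≤ t
      · rw [if_pos h2, if_pos ⟨h2.1, h2.2.1, by omega⟩]
      · rw [if_neg h2, if_neg (by omega)]

lemma pvA2_inv (p : Int) (o : List (List Int)) (m : Nat)
    (hS : pvShape (m + 1) o) (hrow0 : ∀ s < m + 1, pvMget o 0 s = p ^ s) :
    ∀ k, k ≤ m → ∀ r s,
      pvMget ((List.range k).foldl (pvA2out m) o) r s = pvE p o m k r s := by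
  intro k
  induction k with
  | zero =>
    intro _ r s
    rw [List.range_zero, List.foldl_nil]
    unfold pvE
    by_cases h : r ≤ 0 ∧ r < m + 1 ∧ s < m + 1
    · have hr0 : r = 0 := by omega
      subst hr0
      rw [if_pos h, hrow0 s h.2.2]
      unfold pvF
      rw [if_pos rfl]
    · rw [if_neg h]
  | succ k ih =>
    intro hk r s
    have hk' : k ≤ m := by omega
    rw [List.range_succ, List.foldl_append, List.foldl_cons, List.foldl_nil]
    set st := (List.range k).foldl (pvA2out m) o with hst
    have hstlen : st.length = o.length := by
      rw [hst]; exact foldl_len_pres _ (len_pvA2out m) _ _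
    have hstrlen : ∀ r, pvRlen st r = pvRlen o r := fun r => by
      rw [hst]; exact foldl_rlen_pres _ (rlen_pvA2out m) _ _ _
    have h1 := pvA2_inner p o m k (by omega) hS st hstlen hstrlen (ih hk') m (le_refl m) r s
    show pvMget ((List.range m).foldl (pvA2in k) st) r s = _
    rw [h1]
    unfold pvE
    by_cases hinner : r = k + 1 ∧ 1 ≤ s ∧ s ≤ m
    · rw [if_pos hinner, if_pos ⟨by omega, by omega, by omega⟩]
    · rw [if_neg hinner]
      by_cases hck : r ≤ k ∧ r < m + 1 ∧ s < m + 1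
      · rw [if_pos hck, if_pos ⟨by omega, hck.2.1, hck.2.2⟩]
      · rw [if_neg hck]
        by_cases hck1 : r ≤ k + 1 ∧ r < m + 1 ∧ s < m + 1
        · rw [if_pos hck1]
          have hr : r = k + 1 := by omega
          have hs : s = 0 := by omega
          subst hr; subst hs
          unfold pvF
          rw [if_neg (by omega), if_pos rfl]
        · rw [if_neg hck1]

-- entry function during A's pass 3, after the first k outer iterations
def pvE3 (p : Int) (u : List (List Int)) (n k r s : Nat) : Int :=
  if s < k ∧ s < r ∧ r < n then p ^ (r - s) else pvMget u r s

lemma pvA3_inner (p : Int) (u : List (List Int)) (n k : Nat) (hk : k < n)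
    (hS : pvShape n u)
    (hupper : ∀ r s, r < s → s < n → pvMget u r s = p ^ (s - r))
    (cst : List (List Int))
    (hlen : cst.length = u.length) (hrlen : ∀ r, pvRlen cst r = pvRlen u r)
    (hc : ∀ r s, pvMget cst r s = pvE3 p u n k r s) :
    ∀ t, t ≤ n → ∀ r s,
      pvMget ((List.range t).foldl (pvA3in k) cst) r s
        = if s = k ∧ k < r ∧ r < t then p ^ (r - k) else pvE3 p u n k r s := by
  intro t
  induction t with
  | zero =>
    intro _ r s
    rw [List.range_zero, List.foldl_nil, hc r s, if_neg (by omega)]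
  | succ t ih =>
    intro ht r s
    have ht' : t ≤ n := by omega
    rw [List.range_succ, List.foldl_append, List.foldl_cons, List.foldl_nil]
    set st := (List.range t).foldl (pvA3in k) cst with hst
    have hstlen : st.length = u.length := by
      rw [hst, foldl_len_pres _ (len_pvA3in k), hlen]
    have hstrlen : ∀ r, pvRlen st r = pvRlen u r := fun r => by
      rw [hst, foldl_rlen_pres _ (rlen_pvA3in k), hrlen]
    have hget := ih ht'
    unfold pvA3in
    by_cases hkt : k < t
    · rw [if_pos hkt]
      have hval : pvMget st k t = p ^ (t - k) := by
        rw [hget, if_neg (by omega)]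
        unfold pvE3
        rw [if_neg (by omega)]
        exact hupper k t hkt (by omega)
      rw [hval]
      by_cases hrs : r = t ∧ s = k
      · obtain ⟨h1, h2⟩ := hrs
        rw [h1, h2, pvMget_pvMset_self _ _ _ _ (by rw [hstlen]; have := hS.1; omega)
          (by rw [hstrlen]; have := hS.2 t (by omega); omega)]
        rw [if_pos ⟨rfl, hkt, by omega⟩]
      · rw [pvMget_pvMset_ne _ _ _ _ _ _ (by omega), hget]
        by_cases h2 : s = k ∧ k < r ∧ r < t
        · rw [if_pos h2, if_pos ⟨h2.1, h2.2.1, by omega⟩]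
        · rw [if_neg h2, if_neg (by omega)]
    · rw [if_neg hkt, hget]
      by_cases h2 : s = k ∧ k < r ∧ r < t
      · rw [if_pos h2, if_pos ⟨h2.1, h2.2.1, by omega⟩]
      · rw [if_neg h2, if_neg (by omega)]

lemma pvA3_inv (p : Int) (u : List (List Int)) (n : Nat)
    (hS : pvShape n u)
    (hupper : ∀ r s, r < s → s < n → pvMget u r s = p ^ (s - r)) :
    ∀ k, k ≤ n → ∀ r s,
      pvMget ((List.range k).foldl (pvA3out n) u) r s = pvE3 p u n k r s := by
  intro k
  induction k with
  | zero =>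
    intro _ r s
    rw [List.range_zero, List.foldl_nil]
    unfold pvE3
    rw [if_neg (by omega)]
  | succ k ih =>
    intro hk r s
    have hk' : k ≤ n := by omega
    rw [List.range_succ, List.foldl_append, List.foldl_cons, List.foldl_nil]
    set st := (List.range k).foldl (pvA3out n) u with hst
    have hstlen : st.length = u.length := by
      rw [hst]; exact foldl_len_pres _ (len_pvA3out n) _ _
    have hstrlen : ∀ r, pvRlen st r = pvRlen u r := fun r => by
      rw [hst]; exact foldl_rlen_pres _ (rlen_pvA3out n) _ _ _
    have h1 := pvA3_inner p u n k (by omega) hS hupper st hstlen hstrlen (ih hk') n (le_refl n) r s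
    show pvMget ((List.range n).foldl (pvA3in k) st) r s = _
    rw [h1]
    unfold pvE3
    by_cases hinn : s = k ∧ k < r ∧ r < n
    · rw [if_pos hinn, if_pos ⟨by omega, by omega, hinn.2.2⟩, hinn.1]
    · rw [if_neg hinn]
      by_cases h2 : s < k ∧ s < r ∧ r < n
      · rw [if_pos h2, if_pos ⟨by omega, h2.2.1, h2.2.2⟩]
      · rw [if_neg h2, if_neg (by omega)]

-- B: the row-rewriting loop
lemma pvRow_get (p : Int) (i n : Nat) (row : List Int) (hlen : n ≤ row.length) :
    ∀ t, t ≤ n → ∀ s,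
      ((List.range t).foldl (pvBrow p i) row).getD s 0
        = if s < t then (if (i : Int) = (s : Int) then 1 else p ^ ((i : Int) - (s : Int)).natAbs)
          else row.getD s 0 := by
  intro t
  induction t with
  | zero =>
    intro _ s
    rw [List.range_zero, List.foldl_nil, if_neg (by omega)]
  | succ t ih =>
    intro ht s
    have ht' : t ≤ n := by omega
    rw [List.range_succ, List.foldl_append, List.foldl_cons, List.foldl_nil]
    set rw0 := (List.range t).foldl (pvBrow p i) row with hrw0
    have hrlen : rw0.length = row.length := by
      rw [hrw0]; exact foldl_len_pres _ (len_pvBrow p i) _ _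
    unfold pvBrow
    by_cases hs : s = t
    · rw [hs, getD_set_self _ _ _ _ (show t < rw0.length by omega),
        if_pos (show t < t + 1 by omega)]
    · rw [getD_set_ne _ _ _ _ _ hs, ih ht']
      by_cases h2 : s < t
      · rw [if_pos h2, if_pos (show s < t + 1 by omega)]
      · rw [if_neg h2, if_neg (show ¬ s < t + 1 by omega)]

lemma pvB_inv (p : Int) (n : Nat) (c : List (List Int)) (hS : pvShape n c) :
    ∀ k, k ≤ n → ∀ r s,
      pvMget ((List.range k).foldl (pvBout p n) c) r s
        = if r < k ∧ s < n then (if (r : Int) = (s : Int) then 1 else p ^ ((r : Int) - (s : Int)).natAbs)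
          else pvMget c r s := by
  intro k
  induction k with
  | zero =>
    intro _ r s
    rw [List.range_zero, List.foldl_nil, if_neg (by omega)]
  | succ k ih =>
    intro hk r s
    have hk' : k ≤ n := by omega
    rw [List.range_succ, List.foldl_append, List.foldl_cons, List.foldl_nil]
    set st := (List.range k).foldl (pvBout p n) c with hst
    have hstlen : st.length = c.length := by
      rw [hst]; exact foldl_len_pres _ (len_pvBout p n) _ _
    have hstrlen : ∀ r, pvRlen st r = pvRlen c r := fun r => by
      rw [hst]; exact foldl_rlen_pres _ (rlen_pvBout p n) _ _ _
    have hget := ih hk'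
    unfold pvBout
    by_cases hr : r = k
    · rw [hr]
      unfold pvMget
      rw [getD_set_self _ _ _ _ (by rw [hstlen]; have := hS.1; omega)]
      have hrowlen : n ≤ (st.getD k []).length := by
        have h1 : pvRlen st k = pvRlen c k := hstrlen k
        have h2 := hS.2 k (by omega)
        unfold pvRlen at h1 h2
        omega
      rw [pvRow_get p k n (st.getD k []) hrowlen n (le_refl n) s]
      by_cases hs : s < n
      · rw [if_pos hs, if_pos (show k < k + 1 ∧ s < n from ⟨by omega, hs⟩)]
      · rw [if_neg hs, if_neg (show ¬ (k < k + 1 ∧ s < n) by omega)]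
        have := hget k s
        rw [if_neg (show ¬ (k < k ∧ s < n) by omega)] at this
        exact this
    · unfold pvMget
      rw [getD_set_ne _ _ _ _ _ hr]
      have := hget r s
      unfold pvMget at this
      rw [this]
      by_cases h2 : r < k ∧ s < n
      · rw [if_pos h2, if_pos (show r < k + 1 ∧ s < n from ⟨by omega, h2.2⟩)]
      · rw [if_neg h2, if_neg (show ¬ (r < k + 1 ∧ s < n) by omega)]

-- two matrices with equal lengths, row lengths and entries are equal
lemma pv_ext (a b : List (List Int)) (hlen : a.length = b.length)
    (hrlen : ∀ r, pvRlen a r = pvRlen b r)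
    (hget : ∀ r s, pvMget a r s = pvMget b r s) : a = b := by
  apply List.ext_getElem hlen
  intro i h1 h2
  have hrl := hrlen i
  unfold pvRlen at hrl
  rw [List.getD_eq_getElem a [] h1, List.getD_eq_getElem b [] h2] at hrl
  apply List.ext_getElem hrl
  intro j hj1 hj2
  have hg := hget i j
  unfold pvMget at hg
  rw [List.getD_eq_getElem a [] h1, List.getD_eq_getElem b [] h2,
    List.getD_eq_getElem _ _ hj1, List.getD_eq_getElem _ _ hj2] at hg
  exact hg

lemma pv_natAbs (r s : Nat) (h : s ≤ r) : ((r : Int) - (s : Int)).natAbs = r - s := by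
  omega

lemma shape_of_pre (d : Int) (xs : List (List Int)) (hd : 0 < d)
    (h1 : d ≤ xs.length) (h2 : ∀ r ∈ xs.take d.toNat, d ≤ r.length) :
    pvShape d.toNat xs := by
  constructor
  · omega
  · intro r hr
    have hrc : r < xs.length := by omega
    have hlt : r < (xs.take d.toNat).length := by
      rw [List.length_take]; omega
    have hmem : xs[r]'hrc ∈ xs.take d.toNat := by
      have heq : (xs.take d.toNat)[r]'hlt = xs[r]'hrc := List.getElem_take
      exact heq ▸ List.getElem_mem hlt
    have := h2 _ hmem
    unfold pvRlen
    rw [List.getD_eq_getElem xs [] hrc]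
    omega

-- ===== VERDICT (by name: the statement is the Claim_ definition above) =====
theorem cal_cov_spec : Claim_equal_cal_cov := by
  intro d p c hdom hpre
  unfold Spec_cal_cov
  rw [cal_cov_eq_nat, cal_cov_alt_eq_nat]
  rcases le_or_gt d 0 with hd | hd
  · have h0 : d.toNat = 0 := by omega
    have h1 : (d - 1).toNat = 0 := by omega
    rw [h0, h1]
    rfl
  · rcases hpre with hneg | ⟨hlen, hrows⟩
    · omega
    have hS : pvShape d.toNat c := shape_of_pre d c hd hlen hrows
    obtain ⟨m, hm⟩ : ∃ m, d.toNat = m + 1 := ⟨d.toNat - 1, by omega⟩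
    have hm1 : (d - 1).toNat = m := by omega
    rw [hm, hm1]
    rw [hm] at hS
    -- characterize A's three passes
    set o := pvA1 p (m + 1) c with ho
    have holen : o.length = c.length := foldl_len_pres _ (len_pvA1in p) _ _
    have horlen : ∀ r, pvRlen o r = pvRlen c r := fun r =>
      foldl_rlen_pres _ (rlen_pvA1in p) _ _ _
    have hSo : pvShape (m + 1) o := pvShape_of_pres _ _ _ holen horlen hS
    have hA1 : ∀ r s, pvMget o r s = if r = 0 ∧ s < m + 1 then p ^ s else pvMget c r s :=
      fun r s => pvA1_get p (m + 1) c (by have := hS.1; omega) (hS.2 0 (by omega)) r s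
    have hrow0 : ∀ s < m + 1, pvMget o 0 s = p ^ s := fun s hs => by
      rw [hA1 0 s, if_pos ⟨rfl, hs⟩]
    set u := pvA2 p m o with hu
    have hA2 : ∀ r s, pvMget u r s = pvE p o m m r s := fun r s =>
      pvA2_inv p o m hSo hrow0 m (le_refl m) r s
    have hulen : u.length = o.length := foldl_len_pres _ (len_pvA2out m) _ _
    have hurlen : ∀ r, pvRlen u r = pvRlen o r := fun r =>
      foldl_rlen_pres _ (rlen_pvA2out m) _ _ _
    have hSu : pvShape (m + 1) u := pvShape_of_pres _ _ _ hulen hurlen hSo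
    have hupper : ∀ r s, r < s → s < m + 1 → pvMget u r s = p ^ (s - r) := by
      intro r s h1 h2
      rw [hA2]
      unfold pvE
      rw [if_pos ⟨by omega, by omega, h2⟩]
      exact pvF_upper p o r s h1
    have hA3 : ∀ r s, pvMget (pvA3 (m + 1) u) r s = pvE3 p u (m + 1) (m + 1) r s :=
      fun r s => pvA3_inv p u (m + 1) hSu hupper (m + 1) (le_refl _) r s
    -- characterize B
    have hB : ∀ r s, pvMget (pvB p (m + 1) c) r s
        = if r < m + 1 ∧ s < m + 1
          then (if (r : Int) = (s : Int) then 1 else p ^ ((r : Int) - (s : Int)).natAbs)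
          else pvMget c r s :=
      fun r s => pvB_inv p (m + 1) c hS (m + 1) (le_refl _) r s
    -- lengths, row lengths, entries agree
    apply pv_ext
    · show (pvA3 (m + 1) u).length = (pvB p (m + 1) c).length
      unfold pvA3 pvB
      rw [foldl_len_pres _ (len_pvA3out (m + 1)), foldl_len_pres _ (len_pvBout p (m + 1)),
        hulen, holen]
    · intro r
      show pvRlen (pvA3 (m + 1) u) r = pvRlen (pvB p (m + 1) c) r
      unfold pvA3 pvB
      rw [foldl_rlen_pres _ (rlen_pvA3out (m + 1)), foldl_rlen_pres _ (rlen_pvBout p (m + 1)),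
        hurlen, horlen]
    · intro r s
      rw [hA3, hB]
      unfold pvE3
      by_cases h1 : s < m + 1 ∧ s < r ∧ r < m + 1
      · rw [if_pos h1, if_pos (show r < m + 1 ∧ s < m + 1 from ⟨h1.2.2, h1.1⟩),
          if_neg (show ¬ ((r : Int) = (s : Int)) by omega),
          pv_natAbs r s (by omega)]
      · rw [if_neg h1, hA2]
        unfold pvE
        by_cases h2 : r < m + 1 ∧ s < m + 1
        · rw [if_pos (show r ≤ m ∧ r < m + 1 ∧ s < m + 1 from ⟨by omega, h2.1, h2.2⟩),
            if_pos h2]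
          by_cases h3 : r = s
          · rw [h3, if_pos rfl, pvF_diag]
          · rw [if_neg (show ¬ ((r : Int) = (s : Int)) by omega),
              pvF_upper p o r s (by omega)]
            have : ((r : Int) - (s : Int)).natAbs = s - r := by omega
            rw [this]
        · rw [if_neg (show ¬ (r ≤ m ∧ r < m + 1 ∧ s < m + 1) by omega), if_neg h2, hA1,
            if_neg (show ¬ (r = 0 ∧ s < m + 1) by omega)]
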